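-- pv_equiv track=rewrite | github.com/zabojpetr/aoc | 2024/22/v02.py | get_price_for_foursome
-- ===== SOURCE A (Python) =====
-- import typing
--
-- def get_price_for_foursome(prices: typing.List[int]) -> typing.Dict[typing.Tuple[int], int]:
--     diffs = list(map(lambda x: x[0] - x[1], zip(prices, prices[1:])))
--
--     price_seq = {}
--
--     for i in range(len(diffs)-3):
--         k = tuple(diffs[i:i+4])
--         if k not in price_seq:
--             price_seq[k] = prices[i+4]
--
--     return price_seq
-- ===== SOURCE B (Python) =====
-- def get_price_for_foursome(prices):
--     price_seq = {}
--     window = []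
--     for j in range(1, len(prices)):
--         window.append(prices[j - 1] - prices[j])
--         if len(window) > 4:
--             window.pop(0)
--         if len(window) == 4:
--             price_seq.setdefault(tuple(window), prices[j])
--     return price_seq
-- ===== Notes on version B (the rewrite author's own statement) =====
-- stated objective: alternative
-- what changed: B makes a single pass over the prices, computing each consecutive difference on the fly and maintaining a 4-element sliding window plus dict.setdefault, instead of A's precomputed diffs list, re-sliced 4-windows and an explicit membership check.
import Mathlib
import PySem

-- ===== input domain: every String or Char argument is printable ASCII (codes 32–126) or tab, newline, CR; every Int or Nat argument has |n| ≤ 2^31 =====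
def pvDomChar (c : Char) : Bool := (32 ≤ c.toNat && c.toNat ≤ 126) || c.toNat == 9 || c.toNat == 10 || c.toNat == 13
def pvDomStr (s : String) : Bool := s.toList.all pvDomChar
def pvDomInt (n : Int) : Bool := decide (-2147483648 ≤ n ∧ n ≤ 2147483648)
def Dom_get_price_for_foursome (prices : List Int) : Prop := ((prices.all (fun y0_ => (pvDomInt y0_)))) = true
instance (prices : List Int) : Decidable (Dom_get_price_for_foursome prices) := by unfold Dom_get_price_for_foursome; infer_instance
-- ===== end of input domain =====

-- B replaces A's precomputed diffs list + slicing + membership test by one pass with a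
-- 4-element sliding window and dict.setdefault (alternative decomposition, same cost).

-- ===== PORT A =====
def get_price_for_foursome (prices : List Int) : List (List Int × Int) :=
  let diffs := (prices.zip (PySem.List.slice prices (some 1) none)).map (fun x => x.1 - x.2)
  let price_seq : PySem.Dict (List Int) Int :=
    (PySem.List.pyRange 0 ((diffs.length : Int) - 3) 1).foldl
      (fun d i =>
        let k := PySem.List.slice diffs (some i) (some (i + 4))
        if d.contains k then d else d.insert k (PySem.List.pyGetD prices (i + 4) 0))
      PySem.Dict.empty
  price_seq.items

-- ===== PORT B =====
def get_price_for_foursome_alt (prices : List Int) : List (List Int × Int) :=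
  let st :=
    (PySem.List.pyRange 1 ((prices.length : Int)) 1).foldl
      (fun (st : PySem.Dict (List Int) Int × List Int) j =>
        let w1 := st.2 ++ [PySem.List.pyGetD prices (j - 1) 0 - PySem.List.pyGetD prices j 0]
        -- window.pop(0): drop the head (w1 is nonempty in this branch, so tail is exact)
        let w2 := if 4 < w1.length then w1.tail else w1
        let d := if w2.length = 4 then st.1.setdefault w2 (PySem.List.pyGetD prices j 0) else st.1
        (d, w2))
      (PySem.Dict.empty, ([] : List Int))
  st.1.items

-- ===== PRECONDITION & SPEC =====
def Spec_get_price_for_foursome (prices : List Int) (out : List (List Int × Int)) : Prop := out = get_price_for_foursome_alt prices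
instance (prices : List Int) (out : List (List Int × Int)) : Decidable (Spec_get_price_for_foursome prices out) := by unfold Spec_get_price_for_foursome; infer_instance

-- ===== CLAIM (what is proved, stated in full; the proofs are below) =====
def Claim_equal_get_price_for_foursome : Prop := ∀ (prices : List Int), Dom_get_price_for_foursome prices → Spec_get_price_for_foursome prices (get_price_for_foursome prices)

-- ===== LEMMAS AND PROOFS =====

-- the diffs list A builds
def pvDiffs (prices : List Int) : List Int :=
  (prices.zip (PySem.List.slice prices (some 1) none)).map (fun x => x.1 - x.2)

-- A's loop body
def pvStepA (prices diffs : List Int) (d : PySem.Dict (List Int) Int) (i : Int) : PySem.Dict (List Int) Int :=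
  let k := PySem.List.slice diffs (some i) (some (i + 4))
  if d.contains k then d else d.insert k (PySem.List.pyGetD prices (i + 4) 0)

-- B's loop body
def pvStepB (prices : List Int) (st : PySem.Dict (List Int) Int × List Int) (j : Int) :
    PySem.Dict (List Int) Int × List Int :=
  let w1 := st.2 ++ [PySem.List.pyGetD prices (j - 1) 0 - PySem.List.pyGetD prices j 0]
  let w2 := if 4 < w1.length then w1.tail else w1
  let d := if w2.length = 4 then st.1.setdefault w2 (PySem.List.pyGetD prices j 0) else st.1
  (d, w2)

lemma portA_eq (prices : List Int) : get_price_for_foursome prices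
    = ((PySem.List.pyRange 0 (((pvDiffs prices).length : Int) - 3) 1).foldl
        (pvStepA prices (pvDiffs prices)) PySem.Dict.empty).items := rfl

lemma portB_eq (prices : List Int) : get_price_for_foursome_alt prices
    = ((PySem.List.pyRange 1 ((prices.length : Int)) 1).foldl
        (pvStepB prices) (PySem.Dict.empty, ([] : List Int))).1.items := rfl

lemma pvDiffs_length (prices : List Int) : (pvDiffs prices).length = prices.length - 1 := by
  simp [pvDiffs, PySem.List.slice_from_one]

lemma pvDiffs_getElem (prices : List Int) (k : Nat) (hk : k + 1 < prices.length) :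
    (pvDiffs prices)[k]'(by rw [pvDiffs_length]; omega) = prices.getD k 0 - prices.getD (k + 1) 0 := by
  simp [pvDiffs, PySem.List.slice_from_one, List.getElem_zip, List.getElem_tail,
        List.getD_eq_getElem?_getD, List.getElem?_eq_getElem (by omega : k < prices.length),
        List.getElem?_eq_getElem hk]

lemma pvStepA_eq_setdefault (prices diffs : List Int) (d : PySem.Dict (List Int) Int) (i : Int) :
    pvStepA prices diffs d i =
      d.setdefault (PySem.List.slice diffs (some i) (some (i + 4))) (PySem.List.pyGetD prices (i + 4) 0) := by
  unfold pvStepA PySem.Dict.setdefault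
  by_cases h : d.contains (PySem.List.slice diffs (some i) (some (i + 4))) = true
  · rw [if_pos h, if_pos h]
  · rw [if_neg h, if_neg h]
    apply PySem.Dict.ext
    rw [PySem.Dict.items_insert_of_not_contains _ _ (Bool.not_eq_true _ ▸ h)]

-- loop invariant: after B has processed j = 1 .. m-1, its dict is A's dict after
-- i = 0 .. m-5 and its window holds the last ≤4 of the first m-1 diffs
lemma pv_inv (prices : List Int) (m : Nat) (h1 : 1 ≤ m) (hm : m ≤ prices.length) :
    (PySem.List.pyRange 1 (m : Int) 1).foldl (pvStepB prices) (PySem.Dict.empty, ([] : List Int))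
    = ((PySem.List.pyRange 0 ((m : Int) - 4) 1).foldl (pvStepA prices (pvDiffs prices)) PySem.Dict.empty,
       ((pvDiffs prices).take (m - 1)).drop (m - 1 - 4)) := by
  induction m with
  | zero => omega
  | succ m ih =>
    by_cases hm0 : m = 0
    · subst hm0
      rw [PySem.List.pyRange_one_eq_nil (by norm_num), PySem.List.pyRange_one_eq_nil (by norm_num)]
      simp
    · have h1m : 1 ≤ m := by omega
      have hmn : m ≤ prices.length := by omega
      have hdl : (pvDiffs prices).length = prices.length - 1 := pvDiffs_length prices
      have hml : m - 1 < (pvDiffs prices).length := by omega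
      have hpeel : PySem.List.pyRange 1 ((m : Int) + 1) 1
          = PySem.List.pyRange 1 (m : Int) 1 ++ [(m : Int)] :=
        PySem.List.pyRange_one_succ_right (by exact_mod_cast h1m)
      push_cast
      rw [hpeel, List.foldl_append, ih h1m hmn]
      simp only [List.foldl_cons, List.foldl_nil, pvStepB]
      -- the newly appended diff is diffs[m-1]
      have hidx : ((m : Int) - 1) = ((m - 1 : Nat) : Int) := by push_cast [h1m]; ring
      have hd : PySem.List.pyGetD prices ((m : Int) - 1) 0 - PySem.List.pyGetD prices (m : Int) 0
          = (pvDiffs prices)[m - 1]'hml := by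
        rw [hidx]
        simp only [PySem.List.pyGetD_natCast]
        rw [pvDiffs_getElem prices (m - 1) (by omega)]
        have : m - 1 + 1 = m := by omega
        rw [this]
      have htake : (pvDiffs prices).take m
          = (pvDiffs prices).take (m - 1) ++ [(pvDiffs prices)[m - 1]'hml] := by
        have hmm : m = (m - 1) + 1 := by omega
        conv_lhs => rw [hmm]
        rw [List.take_add_one, List.getElem?_eq_getElem hml]
        simp
      rw [hd]
      have hW2 : (if 4 < (List.drop (m - 1 - 4) (List.take (m - 1) (pvDiffs prices)) ++ [(pvDiffs prices)[m - 1]'hml]).length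
            then (List.drop (m - 1 - 4) (List.take (m - 1) (pvDiffs prices)) ++ [(pvDiffs prices)[m - 1]'hml]).tail
            else List.drop (m - 1 - 4) (List.take (m - 1) (pvDiffs prices)) ++ [(pvDiffs prices)[m - 1]'hml])
          = List.drop (m - 4) (List.take m (pvDiffs prices)) := by
        by_cases h4 : m ≤ 4
        · have e1 : m - 1 - 4 = 0 := by omega
          have e2 : m - 4 = 0 := by omega
          rw [e1, e2, List.drop_zero, List.drop_zero, ← htake,
              if_neg (by rw [List.length_take]; omega)]
        · have hWlen : (List.drop (m - 1 - 4) (List.take (m - 1) (pvDiffs prices)) ++ [(pvDiffs prices)[m - 1]'hml]).length = 5 := by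
            rw [List.length_append, List.length_drop, List.length_take]
            simp; omega
          rw [if_pos (by omega),
              List.tail_append_of_ne_nil (by rw [← List.length_pos_iff, List.length_drop, List.length_take]; omega),
              List.tail_drop]
          have e3 : m - 1 - 4 + 1 = m - 4 := by omega
          rw [e3, htake, List.drop_append_of_le_length (by rw [List.length_take]; omega)]
      rw [hW2]
      have hW2len : (List.drop (m - 4) (List.take m (pvDiffs prices))).length = m - (m - 4) := by
        rw [List.length_drop, List.length_take]; omega
      refine Prod.ext ?_ rfl
      simp only
      by_cases h4 : m ≤ 3
      · rw [if_neg (by omega),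
            PySem.List.pyRange_one_eq_nil (by omega),
            PySem.List.pyRange_one_eq_nil (by omega)]
      · -- m ≥ 4: one more A-step fires, with i = m - 4
        have h4' : 4 ≤ m := by omega
        rw [if_pos (by omega)]
        have hsplit : ((m : Int) + 1 - 4) = ((m : Int) - 4) + 1 := by ring
        rw [hsplit, PySem.List.pyRange_one_succ_right (by omega), List.foldl_append,
            List.foldl_cons, List.foldl_nil, pvStepA_eq_setdefault]
        have hkey : PySem.List.slice (pvDiffs prices) (some ((m : Int) - 4)) (some ((m : Int) - 4 + 4))
            = List.drop (m - 4) (List.take m (pvDiffs prices)) := by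
          rw [PySem.List.slice_toNat (pvDiffs prices) (by omega) (by omega), List.drop_take]
          have e1 : ((m : Int) - 4).toNat = m - 4 := by omega
          have e2 : ((m : Int) - 4 + 4).toNat = m := by omega
          rw [e1, e2]
        have hval : ((m : Int) - 4 + 4) = (m : Int) := by ring
        rw [hkey, hval]

lemma pv_main (prices : List Int) : get_price_for_foursome prices = get_price_for_foursome_alt prices := by
  rw [portA_eq, portB_eq]
  rcases Nat.eq_zero_or_pos prices.length with h0 | h1
  · rw [PySem.List.pyRange_one_eq_nil (by rw [pvDiffs_length, h0]; norm_num),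
        PySem.List.pyRange_one_eq_nil (by rw [h0]; norm_num)]
    rfl
  · rw [pv_inv prices prices.length h1 le_rfl]
    have : ((pvDiffs prices).length : Int) - 3 = (prices.length : Int) - 4 := by
      rw [pvDiffs_length]; omega
    rw [this]

-- ===== VERDICT (by name: the statement is the Claim_ definition above) =====
theorem get_price_for_foursome_spec : Claim_equal_get_price_for_foursome := by
  intro prices _
  unfold Spec_get_price_for_foursome
  exact pv_main prices
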